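-- pv_equiv track=rewrite | github.com/chandana-galgali/KJSCE-IT-Reference-Material | Second Year/SEM IV/CPL/Lab/implementation/exp2.py | candy_in_the_box
-- ===== SOURCE A (Python) =====
-- def candy_in_the_box(N, K):
--     if N > K:
--         return K
--     elif 2 * N > K:
--         return 2 * N - K
--     else:
--         if candy_in_the_box(N, (K % (2 * (N - 1)))) == 0:
--             return 2
--         else:
--             return candy_in_the_box(N, (K % (2 * (N - 1))))
-- ===== SOURCE B (Python) =====
-- def candy_in_the_box(N, K):
--     # Iterative form: reduce K modulo the cycle length, then evaluate the
--     # two base expressions; the 0 -> 2 remap only applies after a reduction.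
--     reduced = False
--     while K >= N and K >= 2 * N:
--         K = K % (2 * (N - 1))
--         reduced = True
--     v = K if K < N else 2 * N - K
--     return 2 if reduced and v == 0 else v
-- ===== Notes on version B (the rewrite author's own statement) =====
-- stated objective: simpler
-- what changed: Replaced the self-referential recursion (which evaluates the recursive call twice on the same reduced argument) with a single explicit reduction loop plus the two base-case expressions, gating the 0-to-2 remap on a 'reduced' flag.
import Mathlib
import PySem

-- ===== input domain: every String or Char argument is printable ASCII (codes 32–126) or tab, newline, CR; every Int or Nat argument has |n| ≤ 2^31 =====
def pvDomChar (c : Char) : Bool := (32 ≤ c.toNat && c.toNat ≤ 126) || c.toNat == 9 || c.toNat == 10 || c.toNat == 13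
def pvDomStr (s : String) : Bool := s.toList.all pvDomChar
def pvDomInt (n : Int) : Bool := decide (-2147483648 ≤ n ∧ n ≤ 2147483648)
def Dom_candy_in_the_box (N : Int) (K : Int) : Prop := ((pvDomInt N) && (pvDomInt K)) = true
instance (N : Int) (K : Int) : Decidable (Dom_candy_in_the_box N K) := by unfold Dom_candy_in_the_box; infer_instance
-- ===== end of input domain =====

-- B flattens A's recursion into one reduction loop plus the two base expressions (objective: simpler).

-- ===== PORT A =====
-- A's recursion, with fuel: inside Pre_ the recursion depth is at most 1, so fuel 2
-- reaches exactly the values the Python computes (fuel exhaustion = Python raising, outside Pre_).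
def candyGoA : Nat → Int → Int → Int
  | 0, _, _ => 0
  | f + 1, N, K =>
    if N > K then K
    else if 2 * N > K then 2 * N - K
    else if candyGoA f N (PySem.Int.mod K (2 * (N - 1))) = 0 then 2
    else candyGoA f N (PySem.Int.mod K (2 * (N - 1)))

def candy_in_the_box (N : Int) (K : Int) : Int := candyGoA 2 N K

-- ===== PORT B =====
-- B's while-loop, with fuel: inside Pre_ the loop body runs at most once, so fuel 2 is exact.
def candyLoopB : Nat → Int → Int → Bool → Int × Bool
  | 0, _, K, r => (K, r)
  | f + 1, N, K, r =>
    if N ≤ K ∧ 2 * N ≤ K then candyLoopB f N (PySem.Int.mod K (2 * (N - 1))) true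
    else (K, r)

def candy_in_the_box_alt (N : Int) (K : Int) : Int :=
  let p := candyLoopB 2 N K false
  let v := if p.1 < N then p.1 else 2 * N - p.1
  if p.2 = true ∧ v = 0 then 2 else v

-- ===== PRECONDITION & SPEC =====
-- Pre_ excludes exactly the inputs where Python A raises and returns no value: N = 1 with K ≥ 2
-- (ZeroDivisionError) and N ≤ 0 with K ≥ N and K % (2*(N-1)) ≥ N (RecursionError: the reduced K is a fixed point).
def Pre_candy_in_the_box (N : Int) (K : Int) : Prop :=
  2 ≤ N ∨ K < N ∨ K < 2 * N ∨ (N ≤ 0 ∧ PySem.Int.mod K (2 * (N - 1)) < N)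
instance (N : Int) (K : Int) : Decidable (Pre_candy_in_the_box N K) := by unfold Pre_candy_in_the_box; infer_instance

def pvWitness_candy_in_the_box : Int × Int := (5, 23)

def Spec_candy_in_the_box (N : Int) (K : Int) (out : Int) : Prop := out = candy_in_the_box_alt N K
instance (N : Int) (K : Int) (out : Int) : Decidable (Spec_candy_in_the_box N K out) := by unfold Spec_candy_in_the_box; infer_instance

-- ===== CLAIM (what is proved, stated in full; the proofs are below) =====
def Claim_equal_candy_in_the_box : Prop := ∀ (N : Int) (K : Int), Dom_candy_in_the_box N K → Pre_candy_in_the_box N K → Spec_candy_in_the_box N K (candy_in_the_box N K)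

-- ===== LEMMAS AND PROOFS =====

-- ===== VERDICT (by name: the statement is the Claim_ definition above) =====
theorem candy_in_the_box_spec : Claim_equal_candy_in_the_box := by
  intro N K _ hpre
  unfold Spec_candy_in_the_box candy_in_the_box candy_in_the_box_alt
  by_cases h1 : K < N
  · have hc : ¬ (N ≤ K ∧ 2 * N ≤ K) := by omega
    simp only [candyGoA, candyLoopB, if_neg hc]
    split_ifs <;> simp_all
  · by_cases h2 : K < 2 * N
    · have hc : ¬ (N ≤ K ∧ 2 * N ≤ K) := by omega
      simp only [candyGoA, candyLoopB, if_neg hc]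
      split_ifs <;> simp_all
    · -- reduction case: Pre_ forces 2 ≤ N (one modular step lands in [0, 2*N))
      -- or N ≤ 0 with the reduced K strictly below N (one modular step hits the first base case)
      have hPre : 2 ≤ N ∨ (N ≤ 0 ∧ PySem.Int.mod K (2 * (N - 1)) < N) := by
        unfold Pre_candy_in_the_box at hpre; omega
      have hbound : 0 ≤ PySem.Int.mod K (2 * (N - 1)) ∧ PySem.Int.mod K (2 * (N - 1)) < 2 * (N - 1)
          ∨ PySem.Int.mod K (2 * (N - 1)) < N ∧ N ≤ 0 := by
        rcases hPre with hN | ⟨hN, hfix⟩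
        · exact Or.inl ⟨PySem.Int.mod_nonneg K (by omega), PySem.Int.mod_lt K (by omega)⟩
        · exact Or.inr ⟨hfix, hN⟩
      have hc : (N ≤ K ∧ 2 * N ≤ K) := by omega
      have hc2 : ¬ (N ≤ PySem.Int.mod K (2 * (N - 1)) ∧ 2 * N ≤ PySem.Int.mod K (2 * (N - 1))) := by omega
      have hA1 : ¬ (N > K) := by omega
      have hA2 : ¬ (2 * N > K) := by omega
      simp only [candyGoA, candyLoopB, if_pos hc, if_neg hc2, if_neg hA1, if_neg hA2]
      split_ifs <;> simp_all
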